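-- pv_equiv track=rewrite | github.com/boostcamp-5th-NLP05/programmers-study | youngjun/4_합승택시요금.py | solution
-- ===== SOURCE A (Python) =====
-- from heapq import heappush, heappop
--
-- def solution(n, s, a, b, fares):
--     #다익스트라 3번으로 최소값 구하기
--     graph = [[] for _ in range(n+1)]
--     inf = int(1e9)
--
--     for i in fares:
--         graph[i[0]].append((i[1],i[2]))
--         graph[i[1]].append((i[0],i[2]))
--
--     cost1 = [inf for _ in range(n+1)]
--     cost2 = [inf for _ in range(n+1)]
--     cost3 = [inf for _ in range(n+1)]
--
--     def da(start,cost_list):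
--         cost_list[start] = 0
--         heap = [[0,start]]
--         while heap:
--             cost, loc = heappop(heap)
--
--             if cost_list[loc] < cost:
--                 continue
--
--             for i in graph[loc]:
--                 if cost + i[1] < cost_list[i[0]]:
--                     cost_list[i[0]] = cost + i[1]
--                     heappush(heap,(cost + i[1],i[0]))
--
--     da(s,cost1)
--     da(a,cost2)
--     da(b,cost3)
--
--     answer = inf
--
--     for i in range(1,n+1): #모든 합승 구간 구해서 최소값 구하기
--         answer = min(answer, cost1[i] + cost2[i] + cost3[i])
--
--     return answer
-- ===== SOURCE B (Python) =====
-- def solution(n, s, a, b, fares):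
--     # Relax-to-fixpoint (Bellman-Ford style) instead of three heap Dijkstras: no heap, no stale-entry bookkeeping.
--     inf = int(1e9)
--     edges = []
--     for f in fares:
--         edges.append((f[0], f[1], f[2]))
--         edges.append((f[1], f[0], f[2]))
--
--     def bf(src):
--         d = [inf] * (n + 1)
--         d[src] = 0
--         changed = True
--         while changed:
--             changed = False
--             for (u, v, w) in edges:
--                 if d[u] + w < d[v]:
--                     d[v] = d[u] + w
--                     changed = True
--         return d
--
--     c1 = bf(s)
--     c2 = bf(a)
--     c3 = bf(b)
--
--     answer = inf
--     for i in range(1, n + 1):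
--         answer = min(answer, c1[i] + c2[i] + c3[i])
--     return answer
-- ===== Notes on version B (the rewrite author's own statement) =====
-- stated objective: simpler
-- what changed: Replaces the three heap-based Dijkstra runs (priority queue, stale-entry skips) with plain relax-to-fixpoint Bellman-Ford passes over a flat edge list; the final min over meeting nodes is unchanged.
-- outside the precondition, e.g. on solution(2, 1, 1, 1, [[2, 2, -5]]): A returns 0, B does not finish within the time limit; on solution(2, 1, 1, 1, [[1, 2]]): A raises IndexError, B raises IndexError; on solution(2, 3, 1, 1, []): A raises IndexError, B raises IndexError
import Mathlib
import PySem

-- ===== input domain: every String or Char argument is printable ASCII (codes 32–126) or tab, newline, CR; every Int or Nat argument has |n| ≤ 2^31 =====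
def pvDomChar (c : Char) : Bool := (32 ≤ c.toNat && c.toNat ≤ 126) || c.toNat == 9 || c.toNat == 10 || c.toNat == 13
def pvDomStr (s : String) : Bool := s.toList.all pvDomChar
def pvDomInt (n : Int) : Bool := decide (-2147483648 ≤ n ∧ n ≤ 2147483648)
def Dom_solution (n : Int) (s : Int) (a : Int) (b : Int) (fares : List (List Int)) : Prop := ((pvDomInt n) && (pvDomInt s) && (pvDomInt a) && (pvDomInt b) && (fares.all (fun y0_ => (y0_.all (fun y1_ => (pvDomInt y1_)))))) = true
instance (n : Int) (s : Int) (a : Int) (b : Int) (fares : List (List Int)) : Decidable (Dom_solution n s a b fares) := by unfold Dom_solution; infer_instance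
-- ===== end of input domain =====

-- B replaces the three heap Dijkstras with relax-to-fixpoint Bellman-Ford passes (simpler: no heap, no stale entries); return values agree on the stated domain.

-- ===== PORT A =====
-- Python list index for an index in -len..len-1 (negative = from the end); exact under Pre_,
-- which keeps every index used by either program in that range
def pvIx (len : Nat) (i : Int) : Nat := (if i < 0 then i + (len : Int) else i).toNat

-- models heapq.heappush on a min-heap of (cost, node) pairs: the list is kept sorted in the
-- lexicographic tuple order Python uses, so the head is exactly what heappop returns; this is
-- exact for the sequence of (cost, node) values popped, which is all the algorithm observes.
def pvPush (p : Int × Int) : List (Int × Int) → List (Int × Int)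
  | [] => [p]
  | q :: t => if p.1 < q.1 ∨ (p.1 = q.1 ∧ p.2 ≤ q.2) then p :: q :: t else q :: pvPush p t

-- the 'for i in graph[loc]' body of da (relax every neighbour of the popped node)
def pvRelax (m : Nat) (c : Int) :
    List (Int × Int) → List (Int × Int) → List Int → List (Int × Int) × List Int
  | [], heap, d => (heap, d)
  | (v, w) :: es, heap, d =>
    if c + w < d.getD (pvIx m v) 0 then
      pvRelax m c es (pvPush (c + w, v) heap) (d.set (pvIx m v) (c + w))
    else pvRelax m c es heap d

-- the 'while heap' loop; fuel is only a totality guard (Pre_ inputs terminate well inside it)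
def pvDaLoop (m : Nat) (g : List (List (Int × Int))) :
    Nat → List (Int × Int) → List Int → List Int
  | 0, _, d => d
  | _ + 1, [], d => d
  | fuel + 1, (c, u) :: rest, d =>
    if d.getD (pvIx m u) 0 < c then pvDaLoop m g fuel rest d
    else
      let hd := pvRelax m c (g.getD (pvIx m u) []) rest d
      pvDaLoop m g fuel hd.1 hd.2

def pvDa (g : List (List (Int × Int))) (n : Int) (start : Int) : List Int :=
  pvDaLoop (n.toNat + 1) g ((n.toNat + 1) * 1000000000 + 2) [(0, start)]
    ((List.replicate (n.toNat + 1) 1000000000).set (pvIx (n.toNat + 1) start) 0)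

-- graph[i[0]].append((i[1],i[2])); graph[i[1]].append((i[0],i[2]))
def pvGStep (m : Nat) (g : List (List (Int × Int))) (f : List Int) : List (List (Int × Int)) :=
  let u := f.getD 0 0
  let v := f.getD 1 0
  let w := f.getD 2 0
  let g1 := g.set (pvIx m u) (g.getD (pvIx m u) [] ++ [(v, w)])
  g1.set (pvIx m v) (g1.getD (pvIx m v) [] ++ [(u, w)])

def pvBuildGraph (n : Int) (fares : List (List Int)) : List (List (Int × Int)) :=
  fares.foldl (pvGStep (n.toNat + 1)) (List.replicate (n.toNat + 1) [])

def solution (n : Int) (s : Int) (a : Int) (b : Int) (fares : List (List Int)) : Int :=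
  let g := pvBuildGraph n fares
  let c1 := pvDa g n s
  let c2 := pvDa g n a
  let c3 := pvDa g n b
  (PySem.List.pyRange 1 (n + 1) 1).foldl
    (fun ans i => min ans (c1.getD (pvIx (n.toNat + 1) i) 0 + c2.getD (pvIx (n.toNat + 1) i) 0 +
      c3.getD (pvIx (n.toNat + 1) i) 0)) 1000000000

-- ===== PORT B =====
-- edges.append((f[0],f[1],f[2])); edges.append((f[1],f[0],f[2]))
def pvEStep (e : List (Int × Int × Int)) (f : List Int) : List (Int × Int × Int) :=
  e ++ [(f.getD 0 0, f.getD 1 0, f.getD 2 0), (f.getD 1 0, f.getD 0 0, f.getD 2 0)]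

def pvEdges (fares : List (List Int)) : List (Int × Int × Int) :=
  fares.foldl pvEStep []

-- one 'for (u, v, w) in edges' pass, threading the 'changed' flag
def pvRound (m : Nat) : List (Int × Int × Int) → List Int → Bool → List Int × Bool
  | [], d, ch => (d, ch)
  | (u, v, w) :: es, d, ch =>
    if d.getD (pvIx m u) 0 + w < d.getD (pvIx m v) 0 then
      pvRound m es (d.set (pvIx m v) (d.getD (pvIx m u) 0 + w)) true
    else pvRound m es d ch

-- the 'while changed' loop; fuel is only a totality guard (Pre_ inputs terminate well inside it)
def pvBfLoop (m : Nat) (es : List (Int × Int × Int)) : Nat → List Int → List Int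
  | 0, d => d
  | fuel + 1, d =>
    let r := pvRound m es d false
    if r.2 then pvBfLoop m es fuel r.1 else r.1

def pvBf (es : List (Int × Int × Int)) (n : Int) (src : Int) : List Int :=
  pvBfLoop (n.toNat + 1) es ((n.toNat + 1) * 1000000000 + 2)
    ((List.replicate (n.toNat + 1) 1000000000).set (pvIx (n.toNat + 1) src) 0)

def solution_alt (n : Int) (s : Int) (a : Int) (b : Int) (fares : List (List Int)) : Int :=
  let es := pvEdges fares
  let c1 := pvBf es n s
  let c2 := pvBf es n a
  let c3 := pvBf es n b
  (PySem.List.pyRange 1 (n + 1) 1).foldl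
    (fun ans i => min ans (c1.getD (pvIx (n.toNat + 1) i) 0 + c2.getD (pvIx (n.toNat + 1) i) 0 +
      c3.getD (pvIx (n.toNat + 1) i) 0)) 1000000000

-- ===== PRECONDITION & SPEC =====
-- Pre_ restricts to the problem's natural domain: n ≥ 0, every node id used (sources and fare
-- endpoints, including Python's negative from-the-end ids) a valid index into the n+1 cost
-- cells, fare rows of length ≥ 3, nonnegative fare costs.  Outside it A raises IndexError on
-- out-of-range ids or n < 0, and with negative costs A can diverge or return sentinel-polluted
-- values while B's natural relax-to-fixpoint loop itself diverges.
def Pre_solution (n : Int) (s : Int) (a : Int) (b : Int) (fares : List (List Int)) : Prop :=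
  0 ≤ n ∧
  (-(n + 1) ≤ s ∧ s ≤ n) ∧ (-(n + 1) ≤ a ∧ a ≤ n) ∧ (-(n + 1) ≤ b ∧ b ≤ n) ∧
  ∀ f ∈ fares, 3 ≤ f.length ∧
    (-(n + 1) ≤ f.getD 0 0 ∧ f.getD 0 0 ≤ n) ∧
    (-(n + 1) ≤ f.getD 1 0 ∧ f.getD 1 0 ≤ n) ∧ 0 ≤ f.getD 2 0
instance (n : Int) (s : Int) (a : Int) (b : Int) (fares : List (List Int)) : Decidable (Pre_solution n s a b fares) := by unfold Pre_solution; infer_instance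

def pvWitness_solution : Int × Int × Int × Int × List (List Int) := (3, 1, 2, 3, [[1, 2, 5], [2, 3, 7]])

def Spec_solution (n : Int) (s : Int) (a : Int) (b : Int) (fares : List (List Int)) (out : Int) : Prop := out = solution_alt n s a b fares
instance (n : Int) (s : Int) (a : Int) (b : Int) (fares : List (List Int)) (out : Int) : Decidable (Spec_solution n s a b fares out) := by unfold Spec_solution; infer_instance

-- ===== CLAIM (what is proved, stated in full; the proofs are below) =====
def Claim_equal_solution : Prop := ∀ (n : Int) (s : Int) (a : Int) (b : Int) (fares : List (List Int)), Dom_solution n s a b fares → Pre_solution n s a b fares → Spec_solution n s a b fares (solution n s a b fares)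

-- ===== LEMMAS AND PROOFS =====

-- ---- small getD/set toolbox ----

lemma pv_getD_set_eq {d : List Int} {i : Nat} (x : Int) (h : i < d.length) :
    (d.set i x).getD i 0 = x := by
  simp [List.getD_eq_getElem?_getD, h]

lemma pv_getD_set_ne {d : List Int} {i j : Nat} (x : Int) (h : i ≠ j) :
    (d.set i x).getD j 0 = d.getD j 0 := by
  rw [List.getD_eq_getElem?_getD, List.getElem?_set, if_neg h, List.getD_eq_getElem?_getD]

lemma pv_getD_set_le {d : List Int} {i : Nat} {x : Int} (h : x ≤ d.getD i 0) (k : Nat) :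
    (d.set i x).getD k 0 ≤ d.getD k 0 := by
  by_cases hi : i < d.length
  · by_cases hk : i = k
    · subst hk; rw [pv_getD_set_eq x hi]; exact h
    · rw [pv_getD_set_ne x hk]
  · rw [List.set_eq_of_length_le (by omega)]

lemma pv_getD_set_nonneg {d : List Int} {i : Nat} {x : Int}
    (hd : ∀ k, 0 ≤ d.getD k 0) (hx : 0 ≤ x) (k : Nat) :
    0 ≤ (d.set i x).getD k 0 := by
  by_cases hi : i < d.length
  · by_cases hk : i = k
    · subst hk; rw [pv_getD_set_eq x hi]; exact hx
    · rw [pv_getD_set_ne x hk]; exact hd k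
  · rw [List.set_eq_of_length_le (by omega)]; exact hd k

lemma pv_getD_replicate (n k : Nat) (a : Int) :
    (List.replicate n a).getD k 0 = if k < n then a else 0 := by
  simp only [List.getD_eq_getElem?_getD, List.getElem?_replicate]
  split <;> simp

lemma pv_getD_set_eq' {α : Type} {d : List α} {i : Nat} (x e : α) (h : i < d.length) :
    (d.set i x).getD i e = x := by
  simp [List.getD_eq_getElem?_getD, h]

lemma pv_getD_set_ne' {α : Type} {d : List α} {i j : Nat} (x e : α) (h : i ≠ j) :
    (d.set i x).getD j e = d.getD j e := by
  rw [List.getD_eq_getElem?_getD, List.getElem?_set, if_neg h, List.getD_eq_getElem?_getD]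

lemma pv_getD_replicate_nil {α : Type} (n k : Nat) :
    (List.replicate n ([] : List α)).getD k [] = [] := by
  simp only [List.getD_eq_getElem?_getD, List.getElem?_replicate]
  split <;> simp

lemma pvIx_lt {n x : Int} (hn : 0 ≤ n) (h1 : -(n + 1) ≤ x) (h2 : x ≤ n) :
    pvIx (n.toNat + 1) x < n.toNat + 1 := by
  unfold pvIx
  split <;> omega

-- ---- pvSum : total label mass, the fuel measure ----

def pvSum (d : List Int) : Nat := (d.map Int.toNat).sum

lemma pvSum_set_lt : ∀ (d : List Int) (i : Nat) (x : Int), i < d.length → 0 ≤ x →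
    x < d.getD i 0 → pvSum (d.set i x) < pvSum d := by
  intro d
  induction d with
  | nil => intro i x h; simp at h
  | cons hd tl ih =>
    intro i x hi hx hlt
    cases i with
    | zero =>
      simp only [List.getD, List.getElem?_cons_zero, Option.getD_some] at hlt
      simp only [List.set, pvSum, List.map_cons, List.sum_cons]
      omega
    | succ j =>
      have hj : j < tl.length := by simpa using hi
      have hlt' : x < tl.getD j 0 := by simpa [List.getD] using hlt
      have := ih j x hj hx hlt'
      simp only [List.set, pvSum, List.map_cons, List.sum_cons] at this ⊢
      omega

lemma pvSum_set_le : ∀ (d : List Int) (i : Nat) (x : Int), 0 ≤ x →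
    x ≤ d.getD i 0 → pvSum (d.set i x) ≤ pvSum d := by
  intro d
  induction d with
  | nil => intro i x _ _; simp [pvSum]
  | cons hd tl ih =>
    intro i x hx hle
    cases i with
    | zero =>
      simp only [List.getD, List.getElem?_cons_zero, Option.getD_some] at hle
      simp only [List.set, pvSum, List.map_cons, List.sum_cons]
      omega
    | succ j =>
      have hle' : x ≤ tl.getD j 0 := by simpa [List.getD] using hle
      have := ih j x hx hle'
      simp only [List.set, pvSum, List.map_cons, List.sum_cons] at this ⊢
      omega

lemma pvSum_replicate (n : Nat) : pvSum (List.replicate n 1000000000) = n * 1000000000 := by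
  simp [pvSum, List.map_replicate, List.sum_replicate, smul_eq_mul]

-- ---- the chaotic-relaxation framework both algorithms are instances of ----

-- one relaxation step along an edge of E, from a value x at least the current label of u
def pvStep (m : Nat) (E : List (Int × Int × Int)) (d d' : List Int) : Prop :=
  ∃ u v w x : Int, (u, v, w) ∈ E ∧ d.getD (pvIx m u) 0 ≤ x ∧ x + w < d.getD (pvIx m v) 0 ∧
    pvIx m v < d.length ∧ d' = d.set (pvIx m v) (x + w)

def pvReach (m : Nat) (E : List (Int × Int × Int)) : List Int → List Int → Prop :=
  Relation.ReflTransGen (pvStep m E)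

-- no edge of E can be relaxed any further
def pvClosed (m : Nat) (E : List (Int × Int × Int)) (d : List Int) : Prop :=
  ∀ u v w : Int, (u, v, w) ∈ E → d.getD (pvIx m v) 0 ≤ d.getD (pvIx m u) 0 + w

lemma pvStep_getD_le {m : Nat} {E : List (Int × Int × Int)} {d d' : List Int}
    (h : pvStep m E d d') (k : Nat) : d'.getD k 0 ≤ d.getD k 0 := by
  obtain ⟨u, v, w, x, _, _, hlt, hr, rfl⟩ := h
  exact pv_getD_set_le (by omega) k

lemma pvStep_length {m : Nat} {E : List (Int × Int × Int)} {d d' : List Int}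
    (h : pvStep m E d d') : d'.length = d.length := by
  obtain ⟨u, v, w, x, _, _, _, _, rfl⟩ := h
  simp

lemma pvReach_getD_le {m : Nat} {E : List (Int × Int × Int)} {d d' : List Int}
    (h : pvReach m E d d') (k : Nat) : d'.getD k 0 ≤ d.getD k 0 := by
  induction h with
  | refl => exact le_refl _
  | tail _ hstep ih => exact le_trans (pvStep_getD_le hstep k) ih

lemma pvReach_length {m : Nat} {E : List (Int × Int × Int)} {d d' : List Int}
    (h : pvReach m E d d') : d'.length = d.length := by
  induction h with
  | refl => rfl
  | tail _ hstep ih => rw [pvStep_length hstep, ih]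

-- confluence: a closed reachable state is below every reachable state
lemma pvConf {m : Nat} {E : List (Int × Int × Int)} {d0 c d : List Int}
    (hcR : pvReach m E d0 c) (hcC : pvClosed m E c) (hdR : pvReach m E d0 d) :
    ∀ k : Nat, c.getD k 0 ≤ d.getD k 0 := by
  induction hdR with
  | refl => exact fun k => pvReach_getD_le hcR k
  | tail _ hstep ih =>
    obtain ⟨u, v, w, x, hmem, hxu, hlt, hr, rfl⟩ := hstep
    intro k
    by_cases hk : pvIx m v = k
    · subst hk
      rw [pv_getD_set_eq _ hr]
      have h1 := hcC u v w hmem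
      have h2 := ih (pvIx m u)
      omega
    · rw [pv_getD_set_ne _ hk]
      exact ih k

-- hence any two closed reachable states coincide
lemma pvUnique {m : Nat} {E : List (Int × Int × Int)} {d0 c1 c2 : List Int}
    (h1R : pvReach m E d0 c1) (h1C : pvClosed m E c1)
    (h2R : pvReach m E d0 c2) (h2C : pvClosed m E c2) : c1 = c2 := by
  have hlen : c1.length = c2.length := by
    rw [pvReach_length h1R, pvReach_length h2R]
  refine List.ext_getElem hlen ?_
  intro k hk1 hk2
  have ha := pvConf h1R h1C h2R k
  have hb := pvConf h2R h2C h1R k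
  rw [List.getD_eq_getElem c1 0 hk1, List.getD_eq_getElem c2 0 hk2] at ha hb
  omega

-- well-formed edge lists: valid (possibly negative) node ids, nonnegative weights
def pvEOK (n : Int) (E : List (Int × Int × Int)) : Prop :=
  ∀ e ∈ E, -(n + 1) ≤ e.1 ∧ e.1 ≤ n ∧ -(n + 1) ≤ e.2.1 ∧ e.2.1 ≤ n ∧ 0 ≤ e.2.2

lemma pvEOK_elim {n : Int} {E : List (Int × Int × Int)} (hE : pvEOK n E) {u v w : Int}
    (h : (u, v, w) ∈ E) : -(n + 1) ≤ u ∧ u ≤ n ∧ -(n + 1) ≤ v ∧ v ≤ n ∧ 0 ≤ w := hE _ h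

-- ---- B side: one pvRound pass ----

lemma pvRound_flag_true (n : Int) :
    ∀ (es : List (Int × Int × Int)) (d : List Int),
      (pvRound (n.toNat + 1) es d true).2 = true := by
  intro es
  induction es with
  | nil => intro d; simp [pvRound]
  | cons e t ih =>
    intro d
    obtain ⟨u, v, w⟩ := e
    simp only [pvRound]
    split <;> exact ih _

lemma pvRound_spec (n : Int) (hn : 0 ≤ n) (E : List (Int × Int × Int)) (hE : pvEOK n E) :
    ∀ (es : List (Int × Int × Int)), (∀ e ∈ es, e ∈ E) → ∀ (d : List Int) (ch : Bool),
    d.length = n.toNat + 1 → (∀ k, 0 ≤ d.getD k 0) →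
    pvReach (n.toNat + 1) E d (pvRound (n.toNat + 1) es d ch).1 ∧
    (pvRound (n.toNat + 1) es d ch).1.length = n.toNat + 1 ∧
    (∀ k, 0 ≤ (pvRound (n.toNat + 1) es d ch).1.getD k 0) ∧
    pvSum (pvRound (n.toNat + 1) es d ch).1 ≤ pvSum d ∧
    ((pvRound (n.toNat + 1) es d ch).2 = false →
      (pvRound (n.toNat + 1) es d ch).1 = d ∧
      ∀ e ∈ es, d.getD (pvIx (n.toNat + 1) e.2.1) 0 ≤ d.getD (pvIx (n.toNat + 1) e.1) 0 + e.2.2) ∧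
    (ch = false → (pvRound (n.toNat + 1) es d ch).2 = true →
      pvSum (pvRound (n.toNat + 1) es d ch).1 < pvSum d) := by
  intro es
  induction es with
  | nil =>
    intro _ d ch hlen hNN
    refine ⟨Relation.ReflTransGen.refl, hlen, hNN, le_refl _, fun _ => ⟨rfl, by simp⟩, ?_⟩
    intro h1 h2
    simp [pvRound] at h2
    rw [h1] at h2
    exact absurd h2 (by simp)
  | cons e t ih =>
    intro hes d ch hlen hNN
    obtain ⟨u, v, w⟩ := e
    have heE : (u, v, w) ∈ E := hes _ (List.mem_cons_self ..)
    obtain ⟨hu1, hu2, hv1, hv2, hw⟩ := pvEOK_elim hE heE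
    have htE : ∀ e ∈ t, e ∈ E := fun e he => hes e (List.mem_cons_of_mem _ he)
    by_cases hrel : d.getD (pvIx (n.toNat + 1) u) 0 + w < d.getD (pvIx (n.toNat + 1) v) 0
    · have hvr : pvIx (n.toNat + 1) v < d.length := by
        rw [hlen]; exact pvIx_lt hn hv1 hv2
      have hnn0 : 0 ≤ d.getD (pvIx (n.toNat + 1) u) 0 + w := by
        have := hNN (pvIx (n.toNat + 1) u); omega
      set d1 := d.set (pvIx (n.toNat + 1) v) (d.getD (pvIx (n.toNat + 1) u) 0 + w) with hd1
      have hstep : pvStep (n.toNat + 1) E d d1 :=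
        ⟨u, v, w, d.getD (pvIx (n.toNat + 1) u) 0, heE, le_refl _, hrel, hvr, rfl⟩
      have hlen1 : d1.length = n.toNat + 1 := by rw [hd1]; simpa using hlen
      have hNN1 : ∀ k, 0 ≤ d1.getD k 0 := pv_getD_set_nonneg hNN hnn0
      have hsum1 : pvSum d1 < pvSum d := pvSum_set_lt d _ _ hvr hnn0 hrel
      have hred : pvRound (n.toNat + 1) ((u, v, w) :: t) d ch = pvRound (n.toNat + 1) t d1 true := by
        simp only [pvRound]
        rw [if_pos hrel]
      obtain ⟨ihR, ihL, ihN, ihS, ihF, _⟩ := ih htE d1 true hlen1 hNN1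
      rw [hred]
      refine ⟨Relation.ReflTransGen.head hstep ihR, ihL, ihN, by omega, ?_, ?_⟩
      · intro hfl
        rw [pvRound_flag_true n t d1] at hfl
        exact absurd hfl (by simp)
      · intro _ _
        omega
    · have hred : pvRound (n.toNat + 1) ((u, v, w) :: t) d ch = pvRound (n.toNat + 1) t d ch := by
        simp only [pvRound]
        rw [if_neg hrel]
      obtain ⟨ihR, ihL, ihN, ihS, ihF, ihD⟩ := ih htE d ch hlen hNN
      rw [hred]
      refine ⟨ihR, ihL, ihN, ihS, ?_, ihD⟩
      intro hfl
      obtain ⟨hfix, hall⟩ := ihF hfl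
      refine ⟨hfix, ?_⟩
      intro e he
      rcases List.mem_cons.mp he with h | h
      · subst h; simpa using le_of_not_gt hrel
      · exact hall e h

lemma pvBfLoop_spec (n : Int) (hn : 0 ≤ n) (E : List (Int × Int × Int)) (hE : pvEOK n E) :
    ∀ (fuel : Nat) (d : List Int),
    d.length = n.toNat + 1 → (∀ k, 0 ≤ d.getD k 0) → pvSum d + 1 ≤ fuel →
    pvReach (n.toNat + 1) E d (pvBfLoop (n.toNat + 1) E fuel d) ∧
      pvClosed (n.toNat + 1) E (pvBfLoop (n.toNat + 1) E fuel d) := by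
  intro fuel
  induction fuel with
  | zero => intro d _ _ hf; omega
  | succ fuel ih =>
    intro d hlen hNN hf
    obtain ⟨hR, hL, hN, hS, hF, hD⟩ :=
      pvRound_spec n hn E hE E (fun e he => he) d false hlen hNN
    by_cases hfl : (pvRound (n.toNat + 1) E d false).2 = true
    · have hred : pvBfLoop (n.toNat + 1) E (fuel + 1) d =
          pvBfLoop (n.toNat + 1) E fuel (pvRound (n.toNat + 1) E d false).1 := by
        simp only [pvBfLoop]
        rw [hfl]
        simp
      have hsum := hD rfl hfl
      obtain ⟨ihR, ihC⟩ := ih (pvRound (n.toNat + 1) E d false).1 hL hN (by omega)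
      rw [hred]
      exact ⟨Relation.ReflTransGen.trans hR ihR, ihC⟩
    · have hfl' : (pvRound (n.toNat + 1) E d false).2 = false := by
        cases h : (pvRound (n.toNat + 1) E d false).2
        · rfl
        · exact absurd h hfl
      obtain ⟨hfix, hall⟩ := hF hfl'
      have hred : pvBfLoop (n.toNat + 1) E (fuel + 1) d = (pvRound (n.toNat + 1) E d false).1 := by
        simp only [pvBfLoop]
        rw [hfl']
        simp
      rw [hred, hfix]
      refine ⟨Relation.ReflTransGen.refl, ?_⟩
      intro u v w hm
      exact hall (u, v, w) hm

-- ---- A side: pvPush, pvRelax, pvDaLoop ----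

lemma pvPush_mem (p q : Int × Int) :
    ∀ (h : List (Int × Int)), q ∈ pvPush p h ↔ q = p ∨ q ∈ h := by
  intro h
  induction h with
  | nil => simp [pvPush]
  | cons r t ih =>
    simp only [pvPush]
    split
    · simp [List.mem_cons]
    · simp only [List.mem_cons, ih]
      tauto

lemma pvPush_length (p : Int × Int) :
    ∀ (h : List (Int × Int)), (pvPush p h).length = h.length + 1 := by
  intro h
  induction h with
  | nil => simp [pvPush]
  | cons r t ih =>
    simp only [pvPush]
    split
    · simp
    · simp [ih]

-- the big inner-loop invariant bundle for pvRelax; pu is the POSITION of the popped node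
lemma pvRelax_spec (n : Int) (hn : 0 ≤ n) (E : List (Int × Int × Int)) (hE : pvEOK n E)
    (pu : Nat) (c : Int) (hc0 : 0 ≤ c) :
    ∀ (es : List (Int × Int)),
    (∀ p ∈ es, ∃ u' : Int, pvIx (n.toNat + 1) u' = pu ∧ (u', p.1, p.2) ∈ E) →
    ∀ (heap : List (Int × Int)) (d : List Int),
    d.length = n.toNat + 1 → (∀ k, 0 ≤ d.getD k 0) → d.getD pu 0 ≤ c →
    (∀ p ∈ heap, d.getD (pvIx (n.toNat + 1) p.2) 0 ≤ p.1 ∧ 0 ≤ p.1 ∧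
      -(n + 1) ≤ p.2 ∧ p.2 ≤ n) →
    pvReach (n.toNat + 1) E d (pvRelax (n.toNat + 1) c es heap d).2 ∧
    (pvRelax (n.toNat + 1) c es heap d).2.length = n.toNat + 1 ∧
    (∀ k, 0 ≤ (pvRelax (n.toNat + 1) c es heap d).2.getD k 0) ∧
    (∀ p ∈ heap, p ∈ (pvRelax (n.toNat + 1) c es heap d).1) ∧
    (∀ p ∈ (pvRelax (n.toNat + 1) c es heap d).1,
      (pvRelax (n.toNat + 1) c es heap d).2.getD (pvIx (n.toNat + 1) p.2) 0 ≤ p.1 ∧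
        0 ≤ p.1 ∧ -(n + 1) ≤ p.2 ∧ p.2 ≤ n) ∧
    (∀ pz : Nat,
      (∃ id : Int, pvIx (n.toNat + 1) id = pz ∧ (d.getD pz 0, id) ∈ heap) →
      (∃ id : Int, pvIx (n.toNat + 1) id = pz ∧
        ((pvRelax (n.toNat + 1) c es heap d).2.getD pz 0, id) ∈
          (pvRelax (n.toNat + 1) c es heap d).1)) ∧
    (∀ (pz : Nat) (L : List (Int × Int)),
      (∀ q ∈ L, d.getD (pvIx (n.toNat + 1) q.1) 0 ≤ d.getD pz 0 + q.2) →
      ((∃ id : Int, pvIx (n.toNat + 1) id = pz ∧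
          ((pvRelax (n.toNat + 1) c es heap d).2.getD pz 0, id) ∈
            (pvRelax (n.toNat + 1) c es heap d).1) ∨
        ∀ q ∈ L, (pvRelax (n.toNat + 1) c es heap d).2.getD (pvIx (n.toNat + 1) q.1) 0 ≤
          (pvRelax (n.toNat + 1) c es heap d).2.getD pz 0 + q.2)) ∧
    pvSum (pvRelax (n.toNat + 1) c es heap d).2 + (pvRelax (n.toNat + 1) c es heap d).1.length ≤
      pvSum d + heap.length := by
  intro es
  induction es with
  | nil =>
    intro _ heap d hlen hNN _ hH2
    exact ⟨Relation.ReflTransGen.refl, hlen, hNN, fun p hp => hp, hH2, fun pz hx => hx,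
      fun pz L hL => Or.inr hL, le_refl _⟩
  | cons q t ih =>
    intro hes heap d hlen hNN hdu hH2
    obtain ⟨v, w⟩ := q
    obtain ⟨u', hpu', hqE⟩ := hes _ (List.mem_cons_self ..)
    obtain ⟨_, _, hv1, hv2, hw⟩ := pvEOK_elim hE hqE
    have htE : ∀ p ∈ t, ∃ u'' : Int, pvIx (n.toNat + 1) u'' = pu ∧ (u'', p.1, p.2) ∈ E :=
      fun p hp => hes p (List.mem_cons_of_mem _ hp)
    by_cases hrel : c + w < d.getD (pvIx (n.toNat + 1) v) 0
    · have hvr : pvIx (n.toNat + 1) v < d.length := by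
        rw [hlen]; exact pvIx_lt hn hv1 hv2
      have hnn0 : 0 ≤ c + w := by omega
      set d1 := d.set (pvIx (n.toNat + 1) v) (c + w) with hd1
      set h1 := pvPush (c + w, v) heap with hh1
      have hred : pvRelax (n.toNat + 1) c ((v, w) :: t) heap d =
          pvRelax (n.toNat + 1) c t h1 d1 := by
        simp only [pvRelax]
        rw [if_pos hrel]
      have hstep : pvStep (n.toNat + 1) E d d1 :=
        ⟨u', v, w, c, hqE, by rw [hpu']; exact hdu, hrel, hvr, rfl⟩
      have hlen1 : d1.length = n.toNat + 1 := by rw [hd1]; simpa using hlen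
      have hNN1 : ∀ k, 0 ≤ d1.getD k 0 := pv_getD_set_nonneg hNN hnn0
      have hd1le : ∀ k, d1.getD k 0 ≤ d.getD k 0 := pv_getD_set_le (by omega)
      have hd1v : d1.getD (pvIx (n.toNat + 1) v) 0 = c + w := pv_getD_set_eq _ hvr
      have hH21 : ∀ p ∈ h1, d1.getD (pvIx (n.toNat + 1) p.2) 0 ≤ p.1 ∧ 0 ≤ p.1 ∧
          -(n + 1) ≤ p.2 ∧ p.2 ≤ n := by
        intro p hp
        rcases (pvPush_mem _ p heap).mp hp with h | h
        · subst h
          exact ⟨le_of_eq hd1v, hnn0, hv1, hv2⟩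
        · obtain ⟨ha, hb, hc', hd'⟩ := hH2 p h
          exact ⟨le_trans (hd1le _) ha, hb, hc', hd'⟩
      obtain ⟨ihR, ihL, ihN, ihMono, ihH2, ihCur, ihCl, ihS⟩ :=
        ih htE h1 d1 hlen1 hNN1 (le_trans (hd1le _) hdu) hH21
      rw [hred]
      refine ⟨Relation.ReflTransGen.head hstep ihR, ihL, ihN, ?_, ihH2, ?_, ?_, ?_⟩
      · intro p hp
        exact ihMono p ((pvPush_mem _ p heap).mpr (Or.inr hp))
      · -- current pairs stay current (positionally)
        intro pz hx
        by_cases hpzv : pz = pvIx (n.toNat + 1) v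
        · subst hpzv
          exact ihCur _ ⟨v, rfl, by rw [hd1v]; exact (pvPush_mem _ _ heap).mpr (Or.inl rfl)⟩
        · obtain ⟨id, hid, hmem⟩ := hx
          have hxd : d1.getD pz 0 = d.getD pz 0 := pv_getD_set_ne _ (fun hh => hpzv hh.symm)
          refine ihCur pz ⟨id, hid, ?_⟩
          rw [hxd]
          exact (pvPush_mem _ _ heap).mpr (Or.inr hmem)
      · -- closedness of other positions is preserved or they re-enter the heap
        intro pz L hL
        by_cases hpzv : pz = pvIx (n.toNat + 1) v
        · subst hpzv
          exact Or.inl (ihCur _ ⟨v, rfl, by rw [hd1v]; exact (pvPush_mem _ _ heap).mpr (Or.inl rfl)⟩)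
        · have hxd : d1.getD pz 0 = d.getD pz 0 := pv_getD_set_ne _ (fun hh => hpzv hh.symm)
          refine ihCl pz L ?_
          intro q hq
          have h1' := hL q hq
          have h2' := hd1le (pvIx (n.toNat + 1) q.1)
          omega
      · have hpl : h1.length = heap.length + 1 := pvPush_length _ heap
        have hsum1 : pvSum d1 < pvSum d := pvSum_set_lt d _ _ hvr hnn0 hrel
        omega
    · have hred : pvRelax (n.toNat + 1) c ((v, w) :: t) heap d =
          pvRelax (n.toNat + 1) c t heap d := by
        simp only [pvRelax]
        rw [if_neg hrel]
      rw [hred]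
      exact ih htE heap d hlen hNN hdu hH2

-- the popped node's own edges end up relaxed, or its position re-enters the heap current
lemma pvRelax_self (n : Int) (hn : 0 ≤ n) (E : List (Int × Int × Int)) (hE : pvEOK n E)
    (pu : Nat) (c : Int) (hc0 : 0 ≤ c) :
    ∀ (es : List (Int × Int)),
    (∀ p ∈ es, ∃ u' : Int, pvIx (n.toNat + 1) u' = pu ∧ (u', p.1, p.2) ∈ E) →
    ∀ (heap : List (Int × Int)) (d : List Int),
    d.length = n.toNat + 1 → (∀ k, 0 ≤ d.getD k 0) → d.getD pu 0 = c →
    (∀ p ∈ heap, d.getD (pvIx (n.toNat + 1) p.2) 0 ≤ p.1 ∧ 0 ≤ p.1 ∧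
      -(n + 1) ≤ p.2 ∧ p.2 ≤ n) →
    ((∃ id : Int, pvIx (n.toNat + 1) id = pu ∧
        ((pvRelax (n.toNat + 1) c es heap d).2.getD pu 0, id) ∈
          (pvRelax (n.toNat + 1) c es heap d).1) ∨
      ((pvRelax (n.toNat + 1) c es heap d).2.getD pu 0 = c ∧
        ∀ q ∈ es, (pvRelax (n.toNat + 1) c es heap d).2.getD (pvIx (n.toNat + 1) q.1) 0 ≤
          c + q.2)) := by
  intro es
  induction es with
  | nil =>
    intro _ heap d _ _ hcu _
    exact Or.inr ⟨hcu, by simp⟩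
  | cons q t ih =>
    intro hes heap d hlen hNN hcu hH2
    obtain ⟨v, w⟩ := q
    obtain ⟨u', hpu', hqE⟩ := hes _ (List.mem_cons_self ..)
    obtain ⟨_, _, hv1, hv2, hw⟩ := pvEOK_elim hE hqE
    have htE : ∀ p ∈ t, ∃ u'' : Int, pvIx (n.toNat + 1) u'' = pu ∧ (u'', p.1, p.2) ∈ E :=
      fun p hp => hes p (List.mem_cons_of_mem _ hp)
    by_cases hrel : c + w < d.getD (pvIx (n.toNat + 1) v) 0
    · have hvr : pvIx (n.toNat + 1) v < d.length := by
        rw [hlen]; exact pvIx_lt hn hv1 hv2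
      have hnn0 : 0 ≤ c + w := by omega
      set d1 := d.set (pvIx (n.toNat + 1) v) (c + w) with hd1
      set h1 := pvPush (c + w, v) heap with hh1
      have hred : pvRelax (n.toNat + 1) c ((v, w) :: t) heap d =
          pvRelax (n.toNat + 1) c t h1 d1 := by
        simp only [pvRelax]
        rw [if_pos hrel]
      have hlen1 : d1.length = n.toNat + 1 := by rw [hd1]; simpa using hlen
      have hNN1 : ∀ k, 0 ≤ d1.getD k 0 := pv_getD_set_nonneg hNN hnn0
      have hd1le : ∀ k, d1.getD k 0 ≤ d.getD k 0 := pv_getD_set_le (by omega)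
      have hd1v : d1.getD (pvIx (n.toNat + 1) v) 0 = c + w := pv_getD_set_eq _ hvr
      have hH21 : ∀ p ∈ h1, d1.getD (pvIx (n.toNat + 1) p.2) 0 ≤ p.1 ∧ 0 ≤ p.1 ∧
          -(n + 1) ≤ p.2 ∧ p.2 ≤ n := by
        intro p hp
        rcases (pvPush_mem _ p heap).mp hp with h | h
        · subst h
          exact ⟨le_of_eq hd1v, hnn0, hv1, hv2⟩
        · obtain ⟨ha, hb, hc', hd'⟩ := hH2 p h
          exact ⟨le_trans (hd1le _) ha, hb, hc', hd'⟩
      obtain ⟨ihR, ihL, ihN, ihMono, ihH2, ihCur, ihCl, ihS⟩ :=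
        pvRelax_spec n hn E hE pu c hc0 t htE h1 d1 hlen1 hNN1
          (le_trans (hd1le _) (le_of_eq hcu)) hH21
      rw [hred]
      by_cases hvu : pvIx (n.toNat + 1) v = pu
      · refine Or.inl (ihCur pu ⟨v, hvu, ?_⟩)
        rw [← hvu, hd1v]
        exact (pvPush_mem _ _ heap).mpr (Or.inl rfl)
      · have hcu1 : d1.getD pu 0 = c := by
          rw [pv_getD_set_ne _ hvu]; exact hcu
        rcases ih htE h1 d1 hlen1 hNN1 hcu1 hH21 with h | ⟨heq, hall⟩
        · exact Or.inl h
        · refine Or.inr ⟨heq, ?_⟩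
          intro p hp
          rcases List.mem_cons.mp hp with h | h
          · subst h
            have := pvReach_getD_le ihR (pvIx (n.toNat + 1) v)
            simp only at this ⊢
            omega
          · exact hall p h
    · have hred : pvRelax (n.toNat + 1) c ((v, w) :: t) heap d =
          pvRelax (n.toNat + 1) c t heap d := by
        simp only [pvRelax]
        rw [if_neg hrel]
      have hdv : d.getD (pvIx (n.toNat + 1) v) 0 ≤ c + w := le_of_not_gt hrel
      obtain ⟨ihR, _, _, _, _, _, _, _⟩ :=
        pvRelax_spec n hn E hE pu c hc0 t htE heap d hlen hNN (le_of_eq hcu) hH2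
      rw [hred]
      rcases ih htE heap d hlen hNN hcu hH2 with h | ⟨heq, hall⟩
      · exact Or.inl h
      · refine Or.inr ⟨heq, ?_⟩
        intro p hp
        rcases List.mem_cons.mp hp with h | h
        · subst h
          have := pvReach_getD_le ihR (pvIx (n.toNat + 1) v)
          simp only at this ⊢
          omega
        · exact hall p h

lemma pvDaLoop_spec (n : Int) (hn : 0 ≤ n) (E : List (Int × Int × Int))
    (g : List (List (Int × Int))) (hE : pvEOK n E)
    (hg1 : ∀ u v w : Int, (u, v, w) ∈ E → (v, w) ∈ g.getD (pvIx (n.toNat + 1) u) [])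
    (hg2 : ∀ (p : Nat) (q : Int × Int), q ∈ g.getD p [] →
      ∃ u : Int, pvIx (n.toNat + 1) u = p ∧ (u, q.1, q.2) ∈ E) :
    ∀ (fuel : Nat) (heap : List (Int × Int)) (d : List Int),
    d.length = n.toNat + 1 → (∀ k, 0 ≤ d.getD k 0) →
    (∀ p ∈ heap, d.getD (pvIx (n.toNat + 1) p.2) 0 ≤ p.1 ∧ 0 ≤ p.1 ∧
      -(n + 1) ≤ p.2 ∧ p.2 ≤ n) →
    (∀ pz : Nat, pz < n.toNat + 1 →
      ((∃ id : Int, pvIx (n.toNat + 1) id = pz ∧ (d.getD pz 0, id) ∈ heap) ∨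
        ∀ q ∈ g.getD pz [], d.getD (pvIx (n.toNat + 1) q.1) 0 ≤ d.getD pz 0 + q.2)) →
    pvSum d + heap.length + 1 ≤ fuel →
    pvReach (n.toNat + 1) E d (pvDaLoop (n.toNat + 1) g fuel heap d) ∧
      pvClosed (n.toNat + 1) E (pvDaLoop (n.toNat + 1) g fuel heap d) := by
  intro fuel
  induction fuel with
  | zero => intro heap d _ _ _ _ hf; omega
  | succ fuel ih =>
    intro heap d hlen hNN hH2 hInv hf
    match heap with
    | [] =>
      refine ⟨Relation.ReflTransGen.refl, ?_⟩
      intro u v w hm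
      obtain ⟨hu1, hu2, _, _, _⟩ := pvEOK_elim hE hm
      have hpu : pvIx (n.toNat + 1) u < n.toNat + 1 := pvIx_lt hn hu1 hu2
      rcases hInv (pvIx (n.toNat + 1) u) hpu with h | h
      · obtain ⟨id, _, hmem⟩ := h
        simp at hmem
      · exact h (v, w) (hg1 u v w hm)
    | (c, u) :: rest =>
      obtain ⟨hduc, hc0, hu1, hu2⟩ := hH2 (c, u) (List.mem_cons_self ..)
      have hduc : d.getD (pvIx (n.toNat + 1) u) 0 ≤ c := hduc
      have hc0 : (0 : Int) ≤ c := hc0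
      have hu1 : -(n + 1) ≤ u := hu1
      have hu2 : u ≤ n := hu2
      have hunf : pvDaLoop (n.toNat + 1) g (fuel + 1) ((c, u) :: rest) d
          = if d.getD (pvIx (n.toNat + 1) u) 0 < c then pvDaLoop (n.toNat + 1) g fuel rest d
            else
              let hd := pvRelax (n.toNat + 1) c (g.getD (pvIx (n.toNat + 1) u) []) rest d
              pvDaLoop (n.toNat + 1) g fuel hd.1 hd.2 := rfl
      simp only [List.length_cons] at hf
      by_cases hstale : d.getD (pvIx (n.toNat + 1) u) 0 < c
      · have hred : pvDaLoop (n.toNat + 1) g (fuel + 1) ((c, u) :: rest) d =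
            pvDaLoop (n.toNat + 1) g fuel rest d := by
          rw [hunf, if_pos hstale]
        rw [hred]
        refine ih rest d hlen hNN (fun p hp => hH2 p (List.mem_cons_of_mem _ hp)) ?_ (by omega)
        intro pz hpz
        rcases hInv pz hpz with h | h
        · obtain ⟨id, hid, hmem⟩ := h
          rcases List.mem_cons.mp hmem with h' | h'
          · exfalso
            have hcx : d.getD pz 0 = c := congrArg Prod.fst h'
            have hix : id = u := congrArg Prod.snd h'
            rw [hix] at hid
            rw [hid] at hstale
            omega
          · exact Or.inl ⟨id, hid, h'⟩
        · exact Or.inr h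
      · have hcu : d.getD (pvIx (n.toNat + 1) u) 0 = c :=
          le_antisymm hduc (le_of_not_gt hstale)
        have hes : ∀ p ∈ g.getD (pvIx (n.toNat + 1) u) [],
            ∃ u' : Int, pvIx (n.toNat + 1) u' = pvIx (n.toNat + 1) u ∧ (u', p.1, p.2) ∈ E :=
          fun p hp => hg2 _ p hp
        have hH2r : ∀ p ∈ rest, d.getD (pvIx (n.toNat + 1) p.2) 0 ≤ p.1 ∧ 0 ≤ p.1 ∧
            -(n + 1) ≤ p.2 ∧ p.2 ≤ n :=
          fun p hp => hH2 p (List.mem_cons_of_mem _ hp)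
        obtain ⟨hR, hL, hN, hMono, hH2', hCur, hCl, hS⟩ :=
          pvRelax_spec n hn E hE (pvIx (n.toNat + 1) u) c hc0
            (g.getD (pvIx (n.toNat + 1) u) []) hes rest d hlen hNN hduc hH2r
        have hSelf :=
          pvRelax_self n hn E hE (pvIx (n.toNat + 1) u) c hc0
            (g.getD (pvIx (n.toNat + 1) u) []) hes rest d hlen hNN hcu hH2r
        have hred : pvDaLoop (n.toNat + 1) g (fuel + 1) ((c, u) :: rest) d =
            pvDaLoop (n.toNat + 1) g fuel
              (pvRelax (n.toNat + 1) c (g.getD (pvIx (n.toNat + 1) u) []) rest d).1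
              (pvRelax (n.toNat + 1) c (g.getD (pvIx (n.toNat + 1) u) []) rest d).2 := by
          rw [hunf, if_neg hstale]
        rw [hred]
        have hInv' : ∀ pz : Nat, pz < n.toNat + 1 →
            ((∃ id : Int, pvIx (n.toNat + 1) id = pz ∧
                ((pvRelax (n.toNat + 1) c (g.getD (pvIx (n.toNat + 1) u) []) rest d).2.getD pz 0,
                  id) ∈ (pvRelax (n.toNat + 1) c (g.getD (pvIx (n.toNat + 1) u) []) rest d).1) ∨
              ∀ q ∈ g.getD pz [],
                (pvRelax (n.toNat + 1) c (g.getD (pvIx (n.toNat + 1) u) []) rest d).2.getD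
                    (pvIx (n.toNat + 1) q.1) 0 ≤
                  (pvRelax (n.toNat + 1) c (g.getD (pvIx (n.toNat + 1) u) []) rest d).2.getD
                    pz 0 + q.2) := by
          intro pz hpz
          rcases hInv pz hpz with h | h
          · obtain ⟨id, hid, hmem⟩ := h
            rcases List.mem_cons.mp hmem with h' | h'
            · -- the popped pair: use pvRelax_self
              have hcx : d.getD pz 0 = c := congrArg Prod.fst h'
              have hix : id = u := congrArg Prod.snd h'
              have hpzu : pz = pvIx (n.toNat + 1) u := by
                rw [hix] at hid; omega
              subst hpzu
              rcases hSelf with hs | ⟨heq, hall⟩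
              · exact Or.inl hs
              · refine Or.inr ?_
                intro q hq
                rw [heq]
                exact hall q hq
            · exact Or.inl (hCur pz ⟨id, hid, h'⟩)
          · exact hCl pz (g.getD pz []) h
        obtain ⟨ihR, ihC⟩ := ih _ _ hL hN hH2' hInv' (by omega)
        exact ⟨Relation.ReflTransGen.trans hR ihR, ihC⟩

-- ---- graph/edge-list correspondence ----

def pvFareOK (n : Int) (f : List Int) : Prop :=
  (-(n + 1) ≤ f.getD 0 0 ∧ f.getD 0 0 ≤ n) ∧
  (-(n + 1) ≤ f.getD 1 0 ∧ f.getD 1 0 ≤ n) ∧ 0 ≤ f.getD 2 0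

lemma pvBuild_corr (n : Int) (hn : 0 ≤ n) :
    ∀ (fares : List (List Int)) (g : List (List (Int × Int))) (e : List (Int × Int × Int)),
    (∀ f ∈ fares, pvFareOK n f) →
    g.length = n.toNat + 1 →
    (∀ u v w : Int, (u, v, w) ∈ e → (v, w) ∈ g.getD (pvIx (n.toNat + 1) u) []) →
    (∀ (p : Nat) (q : Int × Int), q ∈ g.getD p [] →
      ∃ u : Int, pvIx (n.toNat + 1) u = p ∧ (u, q.1, q.2) ∈ e) →
    pvEOK n e →
    (fares.foldl (pvGStep (n.toNat + 1)) g).length = n.toNat + 1 ∧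
    (∀ u v w : Int, (u, v, w) ∈ fares.foldl pvEStep e →
      (v, w) ∈ (fares.foldl (pvGStep (n.toNat + 1)) g).getD (pvIx (n.toNat + 1) u) []) ∧
    (∀ (p : Nat) (q : Int × Int), q ∈ (fares.foldl (pvGStep (n.toNat + 1)) g).getD p [] →
      ∃ u : Int, pvIx (n.toNat + 1) u = p ∧ (u, q.1, q.2) ∈ fares.foldl pvEStep e) ∧
    pvEOK n (fares.foldl pvEStep e) := by
  intro fares
  induction fares with
  | nil => intro g e _ h1 h2 h3 h4; exact ⟨h1, h2, h3, h4⟩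
  | cons f fs ih =>
    intro g e hOK hlen hg1 hg2 hEOK
    obtain ⟨⟨hu1, hu2⟩, ⟨hv1, hv2⟩, hw⟩ := hOK f (List.mem_cons_self ..)
    have hOK' : ∀ f' ∈ fs, pvFareOK n f' := fun f' hf' => hOK f' (List.mem_cons_of_mem _ hf')
    set u := f.getD 0 0 with hu
    set v := f.getD 1 0 with hv
    set w := f.getD 2 0 with hw'
    set pu := pvIx (n.toNat + 1) u with hpu
    set pv := pvIx (n.toNat + 1) v with hpv
    have hur : pu < g.length := by rw [hlen]; exact pvIx_lt hn hu1 hu2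
    have hvr : pv < g.length := by rw [hlen]; exact pvIx_lt hn hv1 hv2
    have hlen1 : (pvGStep (n.toNat + 1) g f).length = n.toNat + 1 := by
      simp only [pvGStep, List.length_set]
      exact hlen
    have hadj : ∀ p : Nat, (pvGStep (n.toNat + 1) g f).getD p [] =
        (g.getD p [] ++ (if p = pu then [(v, w)] else []))
          ++ (if p = pv then [(u, w)] else []) := by
      intro p
      show ((g.set pu (g.getD pu [] ++ [(v, w)])).set pv
        ((g.set pu (g.getD pu [] ++ [(v, w)])).getD pv [] ++ [(u, w)])).getD p [] = _
      by_cases hpv' : p = pv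
      · rw [hpv', pv_getD_set_eq' _ _ (by simpa using hvr)]
        by_cases hvu : pv = pu
        · rw [hvu, pv_getD_set_eq' _ _ hur]
          simp
        · rw [pv_getD_set_ne' _ _ (fun hh => hvu hh.symm)]
          simp [hvu]
      · rw [pv_getD_set_ne' _ _ (fun hh => hpv' hh.symm)]
        by_cases hpu' : p = pu
        · have hnpv : ¬ pu = pv := by omega
          rw [hpu', pv_getD_set_eq' _ _ hur]
          simp [hnpv]
        · rw [pv_getD_set_ne' _ _ (fun hh => hpu' hh.symm)]
          simp [hpv', hpu']
    have hg1' : ∀ u0 v0 w0 : Int, (u0, v0, w0) ∈ pvEStep e f →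
        (v0, w0) ∈ (pvGStep (n.toNat + 1) g f).getD (pvIx (n.toNat + 1) u0) [] := by
      intro u0 v0 w0 hm
      have hm2 : (u0, v0, w0) ∈ e ++ [(u, v, w), (v, u, w)] := hm
      rw [hadj]
      rcases List.mem_append.mp hm2 with h | h
      · exact List.mem_append.mpr (Or.inl (List.mem_append.mpr (Or.inl (hg1 u0 v0 w0 h))))
      · rcases List.mem_cons.mp h with h | h
        · have e1 : u0 = u := congrArg Prod.fst h
          have e2 : v0 = v := congrArg (fun z => z.2.1) h
          have e3 : w0 = w := congrArg (fun z => z.2.2) h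
          subst e1; subst e2; subst e3
          exact List.mem_append.mpr (Or.inl (List.mem_append.mpr (Or.inr (by simp [← hpu]))))
        · simp only [List.mem_singleton] at h
          have e1 : u0 = v := congrArg Prod.fst h
          have e2 : v0 = u := congrArg (fun z => z.2.1) h
          have e3 : w0 = w := congrArg (fun z => z.2.2) h
          subst e1; subst e2; subst e3
          exact List.mem_append.mpr (Or.inr (by simp [← hpv]))
    have hg2' : ∀ (p : Nat) (q : Int × Int), q ∈ (pvGStep (n.toNat + 1) g f).getD p [] →
        ∃ u0 : Int, pvIx (n.toNat + 1) u0 = p ∧ (u0, q.1, q.2) ∈ pvEStep e f := by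
      intro p q hq
      rw [hadj] at hq
      have hsub : ∀ z : Int × Int × Int, z ∈ e → z ∈ pvEStep e f := by
        intro z hz
        exact List.mem_append.mpr (Or.inl hz)
      rcases List.mem_append.mp hq with h | h
      · rcases List.mem_append.mp h with h' | h'
        · obtain ⟨u0, hpu0, hmem⟩ := hg2 p q h'
          exact ⟨u0, hpu0, hsub _ hmem⟩
        · split at h'
          · rename_i hppu
            simp only [List.mem_singleton] at h'
            subst h'
            refine ⟨u, hppu ▸ rfl, ?_⟩
            show (u, v, w) ∈ e ++ [(u, v, w), (v, u, w)]
            simp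
          · simp at h'
      · split at h
        · rename_i hppv
          simp only [List.mem_singleton] at h
          subst h
          refine ⟨v, hppv ▸ rfl, ?_⟩
          show (v, u, w) ∈ e ++ [(u, v, w), (v, u, w)]
          simp
        · simp at h
    have hEOK1 : pvEOK n (pvEStep e f) := by
      intro e' he'
      have he2 : e' ∈ e ++ [(u, v, w), (v, u, w)] := he'
      rcases List.mem_append.mp he2 with h | h
      · exact hEOK e' h
      · rcases List.mem_cons.mp h with h | h
        · subst h; exact ⟨hu1, hu2, hv1, hv2, hw⟩
        · simp only [List.mem_singleton] at h
          subst h; exact ⟨hv1, hv2, hu1, hu2, hw⟩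
    exact ih (pvGStep (n.toNat + 1) g f) (pvEStep e f) hOK' hlen1 hg1' hg2' hEOK1

-- ---- facts about the shared start vector ----

lemma pv_d0_facts (n src : Int) (hn : 0 ≤ n) (h1 : -(n + 1) ≤ src) (h2 : src ≤ n) :
    ((List.replicate (n.toNat + 1) 1000000000).set (pvIx (n.toNat + 1) src) (0 : Int)).length
      = n.toNat + 1 ∧
    (∀ k, 0 ≤ ((List.replicate (n.toNat + 1) 1000000000).set (pvIx (n.toNat + 1) src)
      (0 : Int)).getD k 0) ∧
    (∀ k, ((List.replicate (n.toNat + 1) 1000000000).set (pvIx (n.toNat + 1) src)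
      (0 : Int)).getD k 0 ≤ 1000000000) ∧
    ((List.replicate (n.toNat + 1) 1000000000).set (pvIx (n.toNat + 1) src)
      (0 : Int)).getD (pvIx (n.toNat + 1) src) 0 = 0 ∧
    (∀ k, k ≠ pvIx (n.toNat + 1) src →
      ((List.replicate (n.toNat + 1) 1000000000).set (pvIx (n.toNat + 1) src)
        (0 : Int)).getD k 0 = if k < n.toNat + 1 then 1000000000 else 0) ∧
    pvSum ((List.replicate (n.toNat + 1) 1000000000).set (pvIx (n.toNat + 1) src) (0 : Int)) ≤
      (n.toNat + 1) * 1000000000 := by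
  have hsr : pvIx (n.toNat + 1) src < (List.replicate (n.toNat + 1) (1000000000 : Int)).length := by
    rw [List.length_replicate]; exact pvIx_lt hn h1 h2
  have hself : ((List.replicate (n.toNat + 1) 1000000000).set (pvIx (n.toNat + 1) src)
      (0 : Int)).getD (pvIx (n.toNat + 1) src) 0 = 0 := pv_getD_set_eq _ hsr
  have hother : ∀ k, k ≠ pvIx (n.toNat + 1) src →
      ((List.replicate (n.toNat + 1) 1000000000).set (pvIx (n.toNat + 1) src)
        (0 : Int)).getD k 0 = if k < n.toNat + 1 then 1000000000 else 0 := by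
    intro k hk
    rw [pv_getD_set_ne _ (fun h => hk h.symm), pv_getD_replicate]
  refine ⟨by simp, ?_, ?_, hself, hother, ?_⟩
  · intro k
    by_cases hk : k = pvIx (n.toNat + 1) src
    · subst hk; omega
    · rw [hother k hk]; split <;> omega
  · intro k
    by_cases hk : k = pvIx (n.toNat + 1) src
    · subst hk; omega
    · rw [hother k hk]; split <;> omega
  · calc pvSum ((List.replicate (n.toNat + 1) 1000000000).set (pvIx (n.toNat + 1) src) (0 : Int))
        ≤ pvSum (List.replicate (n.toNat + 1) 1000000000) := by
          refine pvSum_set_le _ _ 0 (le_refl 0) ?_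
          rw [pv_getD_replicate]
          split <;> omega
      _ = (n.toNat + 1) * 1000000000 := pvSum_replicate _

-- ---- putting it together: pvDa = pvBf on the shared start vector ----

lemma pvDa_eq_pvBf (n src : Int) (fares : List (List Int)) (hn : 0 ≤ n)
    (hOK : ∀ f ∈ fares, pvFareOK n f) (h1 : -(n + 1) ≤ src) (h2 : src ≤ n) :
    pvDa (pvBuildGraph n fares) n src = pvBf (pvEdges fares) n src := by
  obtain ⟨hGlen, hg1, hg2, hEOK⟩ :=
    pvBuild_corr n hn fares (List.replicate (n.toNat + 1) []) [] hOK (by simp)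
      (by intro u v w h; simp at h)
      (by intro p q hq; rw [pv_getD_replicate_nil] at hq; simp at hq)
      (by intro e he; simp at he)
  obtain ⟨hlen, hNN, hBound, hself, hother, hsum⟩ := pv_d0_facts n src hn h1 h2
  have hH2 : ∀ p ∈ [((0 : Int), src)],
      ((List.replicate (n.toNat + 1) 1000000000).set (pvIx (n.toNat + 1) src)
        (0 : Int)).getD (pvIx (n.toNat + 1) p.2) 0 ≤ p.1 ∧
        0 ≤ p.1 ∧ -(n + 1) ≤ p.2 ∧ p.2 ≤ n := by
    intro p hp
    simp only [List.mem_singleton] at hp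
    subst hp
    exact ⟨le_of_eq hself, le_refl _, h1, h2⟩
  have hInv : ∀ pz : Nat, pz < n.toNat + 1 →
      ((∃ id : Int, pvIx (n.toNat + 1) id = pz ∧
          (((List.replicate (n.toNat + 1) 1000000000).set (pvIx (n.toNat + 1) src)
            (0 : Int)).getD pz 0, id) ∈ [((0 : Int), src)]) ∨
        ∀ q ∈ (pvBuildGraph n fares).getD pz [],
          ((List.replicate (n.toNat + 1) 1000000000).set (pvIx (n.toNat + 1) src)
            (0 : Int)).getD (pvIx (n.toNat + 1) q.1) 0 ≤
          ((List.replicate (n.toNat + 1) 1000000000).set (pvIx (n.toNat + 1) src)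
            (0 : Int)).getD pz 0 + q.2) := by
    intro pz hpz
    by_cases hx : pz = pvIx (n.toNat + 1) src
    · subst hx
      exact Or.inl ⟨src, rfl, by rw [hself]; simp⟩
    · refine Or.inr ?_
      intro q hq
      obtain ⟨u', _, hqE⟩ := hg2 pz q hq
      obtain ⟨_, _, _, _, hqw⟩ := pvEOK_elim hEOK hqE
      have hxv : ((List.replicate (n.toNat + 1) 1000000000).set (pvIx (n.toNat + 1) src)
          (0 : Int)).getD pz 0 = 1000000000 := by
        rw [hother pz hx]
        simp only [if_pos hpz]
      have := hBound (pvIx (n.toNat + 1) q.1)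
      omega
  obtain ⟨hdaR, hdaC⟩ :=
    pvDaLoop_spec n hn (pvEdges fares) (pvBuildGraph n fares) hEOK hg1 hg2
      ((n.toNat + 1) * 1000000000 + 2) [((0 : Int), src)]
      ((List.replicate (n.toNat + 1) 1000000000).set (pvIx (n.toNat + 1) src) (0 : Int))
      hlen hNN hH2 hInv (by simp only [List.length_singleton]; omega)
  obtain ⟨hbfR, hbfC⟩ :=
    pvBfLoop_spec n hn (pvEdges fares) hEOK ((n.toNat + 1) * 1000000000 + 2)
      ((List.replicate (n.toNat + 1) 1000000000).set (pvIx (n.toNat + 1) src) (0 : Int))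
      hlen hNN (by omega)
  show pvDaLoop (n.toNat + 1) (pvBuildGraph n fares) ((n.toNat + 1) * 1000000000 + 2)
      [((0 : Int), src)]
      ((List.replicate (n.toNat + 1) 1000000000).set (pvIx (n.toNat + 1) src) (0 : Int)) =
    pvBfLoop (n.toNat + 1) (pvEdges fares) ((n.toNat + 1) * 1000000000 + 2)
      ((List.replicate (n.toNat + 1) 1000000000).set (pvIx (n.toNat + 1) src) (0 : Int))
  exact pvUnique hdaR hdaC hbfR hbfC

-- ===== VERDICT (by name: the statement is the Claim_ definition above) =====
theorem solution_spec : Claim_equal_solution := by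
  intro n s a b fares _ hPre
  obtain ⟨hn, ⟨hs1, hs2⟩, ⟨ha1, ha2⟩, ⟨hb1, hb2⟩, hF⟩ := hPre
  have hOK : ∀ f ∈ fares, pvFareOK n f := by
    intro f hf
    obtain ⟨_, h⟩ := hF f hf
    exact h
  have e1 := pvDa_eq_pvBf n s fares hn hOK hs1 hs2
  have e2 := pvDa_eq_pvBf n a fares hn hOK ha1 ha2
  have e3 := pvDa_eq_pvBf n b fares hn hOK hb1 hb2
  show solution n s a b fares = solution_alt n s a b fares
  simp only [solution, solution_alt]
  rw [e1, e2, e3]
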